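-- pv_equiv track=rewrite | github.com/asotbz/asot.tv | scripts/enrich_imdb_musicvideos.py | map_to_broad_genre
-- ===== SOURCE A (Python) =====
-- from typing import Any, Dict, List, Optional, Tuple
--
-- def first_or_empty(items: List[str]) -> str:
--     for it in items:
--         s = (it or "").strip()
--         if s:
--             return s
--     return ""
--
-- _BROAD_GENRES = [
--     "Hip Hop/R&B",
--     "Rock",
--     "Pop",
--     "Metal",
--     "Country",
--     "Electronic",
--     "Alternative",
--     "Dance",
-- ]
--
-- def map_to_broad_genre(candidates: List[str]) -> str:
--     """
--     Map a list of candidate genre/tag strings to one broad genre.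
--     Priority by first match in order below.
--     """
--     keys = [c.lower() for c in candidates if c]
--     # Hip Hop / R&B
--     if any(k in keys for k in ["hip hop", "hip-hop", "rap", "r&b", "new jack swing"]):
--         return "Hip Hop/R&B"
--     # Metal
--     if any("metal" in k for k in keys):
--         return "Metal"
--     # Rock / Alternative / Punk
--     if any(k in keys for k in ["rock", "alternative", "alt rock", "alt-rock", "punk", "punk rock", "grunge", "indie rock", "hard rock"]):
--         return "Rock"
--     # Electronic / Dance
--     if any(k in keys for k in ["electronic", "dance", "house", "techno", "edm", "trip-hop", "triphop"]):
--         if "dance" in keys: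
--             return "Dance"
--         return "Electronic"
--     # Pop
--     if any("pop" in k for k in keys):
--         return "Pop"
--     # Country
--     if any("country" in k for k in keys):
--         return "Country"
--     # Fallback Alternative if appears
--     if any("alternative" in k for k in keys):
--         return "Alternative"
--     # Last resort: first normalized
--     return first_or_empty(_BROAD_GENRES)
-- ===== SOURCE B (Python) =====
-- from typing import List
--
-- _HIPHOP = {"hip hop", "hip-hop", "rap", "r&b", "new jack swing"}
-- _ROCK = {"rock", "alternative", "alt rock", "alt-rock", "punk", "punk rock",
--          "grunge", "indie rock", "hard rock"}
-- _ELEC = {"electronic", "dance", "house", "techno", "edm", "trip-hop", "triphop"}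
--
-- def map_to_broad_genre(candidates: List[str]) -> str:
--     """One pass over the candidates collecting category flags, then one
--     fixed-priority decision (no repeated per-category scans)."""
--     hiphop = metal = rock = elec = dance = pop = country = alt = False
--     for c in candidates:
--         if not c:
--             continue
--         k = c.lower()
--         hiphop = hiphop or k in _HIPHOP
--         metal = metal or "metal" in k
--         rock = rock or k in _ROCK
--         elec = elec or k in _ELEC
--         dance = dance or k == "dance"
--         pop = pop or "pop" in k
--         country = country or "country" in k
--         alt = alt or "alternative" in k
--     if hiphop:
--         return "Hip Hop/R&B"
--     if metal:
--         return "Metal"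
--     if rock:
--         return "Rock"
--     if elec:
--         return "Dance" if dance else "Electronic"
--     if pop:
--         return "Pop"
--     if country:
--         return "Country"
--     if alt:
--         return "Alternative"
--     return "Hip Hop/R&B"
-- ===== Notes on version B (the rewrite author's own statement) =====
-- stated objective: alternative
-- what changed: Replaces the per-category scans over a materialized keys list (plus the first_or_empty fallback walk) with a single pass that lowercases each candidate once and accumulates eight category flags, followed by one fixed-priority decision.
import Mathlib
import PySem

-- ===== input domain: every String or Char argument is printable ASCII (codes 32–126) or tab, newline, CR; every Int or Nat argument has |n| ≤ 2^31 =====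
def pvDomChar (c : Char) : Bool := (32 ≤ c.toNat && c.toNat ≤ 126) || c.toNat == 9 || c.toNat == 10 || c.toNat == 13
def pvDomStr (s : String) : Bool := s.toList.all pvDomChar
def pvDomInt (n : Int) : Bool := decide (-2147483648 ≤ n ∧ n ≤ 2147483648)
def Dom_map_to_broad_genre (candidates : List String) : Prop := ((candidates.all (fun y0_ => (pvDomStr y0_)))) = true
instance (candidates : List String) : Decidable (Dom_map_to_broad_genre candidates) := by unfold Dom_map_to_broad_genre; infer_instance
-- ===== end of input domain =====

-- B replaces A's repeated per-category scans with one flag-collecting pass plus a priority decision; same results.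

-- ===== PORT A =====
def pvFirstOrEmpty (items : List String) : String :=
  match items with
  | [] => ""
  | it :: rest =>
    let s := PySem.Str.strip it
    if s ≠ "" then s else pvFirstOrEmpty rest

def pvBroadGenres : List String :=
  ["Hip Hop/R&B", "Rock", "Pop", "Metal", "Country", "Electronic", "Alternative", "Dance"]

def map_to_broad_genre (candidates : List String) : String :=
  let keys := (candidates.filter (fun c => c ≠ "")).map PySem.Str.lower
  if (["hip hop", "hip-hop", "rap", "r&b", "new jack swing"].any (fun k => keys.contains k)) then
    "Hip Hop/R&B"
  else if keys.any (fun k => PySem.Str.isIn "metal" k) then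
    "Metal"
  else if (["rock", "alternative", "alt rock", "alt-rock", "punk", "punk rock", "grunge",
            "indie rock", "hard rock"].any (fun k => keys.contains k)) then
    "Rock"
  else if (["electronic", "dance", "house", "techno", "edm", "trip-hop", "triphop"].any
            (fun k => keys.contains k)) then
    (if keys.contains "dance" then "Dance" else "Electronic")
  else if keys.any (fun k => PySem.Str.isIn "pop" k) then
    "Pop"
  else if keys.any (fun k => PySem.Str.isIn "country" k) then
    "Country"
  else if keys.any (fun k => PySem.Str.isIn "alternative" k) then
    "Alternative"
  else
    pvFirstOrEmpty pvBroadGenres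

-- ===== PORT B =====
def pvHipSet : List String := ["hip hop", "hip-hop", "rap", "r&b", "new jack swing"]
def pvRockSet : List String :=
  ["rock", "alternative", "alt rock", "alt-rock", "punk", "punk rock", "grunge",
   "indie rock", "hard rock"]
def pvElecSet : List String :=
  ["electronic", "dance", "house", "techno", "edm", "trip-hop", "triphop"]

def pvFlags := Bool × Bool × Bool × Bool × Bool × Bool × Bool × Bool

def pvStep (st : pvFlags) (c : String) : pvFlags :=
  if c = "" then st
  else
    let k := PySem.Str.lower c
    (st.1 || PySem.Set.contains pvHipSet k,
     st.2.1 || PySem.Str.isIn "metal" k,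
     st.2.2.1 || PySem.Set.contains pvRockSet k,
     st.2.2.2.1 || PySem.Set.contains pvElecSet k,
     st.2.2.2.2.1 || (k == "dance"),
     st.2.2.2.2.2.1 || PySem.Str.isIn "pop" k,
     st.2.2.2.2.2.2.1 || PySem.Str.isIn "country" k,
     st.2.2.2.2.2.2.2 || PySem.Str.isIn "alternative" k)

def map_to_broad_genre_alt (candidates : List String) : String :=
  let st := candidates.foldl pvStep
    (false, false, false, false, false, false, false, false)
  if st.1 then "Hip Hop/R&B"
  else if st.2.1 then "Metal"
  else if st.2.2.1 then "Rock"
  else if st.2.2.2.1 then (if st.2.2.2.2.1 then "Dance" else "Electronic")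
  else if st.2.2.2.2.2.1 then "Pop"
  else if st.2.2.2.2.2.2.1 then "Country"
  else if st.2.2.2.2.2.2.2 then "Alternative"
  else "Hip Hop/R&B"

-- ===== PRECONDITION & SPEC =====
def Spec_map_to_broad_genre (candidates : List String) (out : String) : Prop := out = map_to_broad_genre_alt candidates
instance (candidates : List String) (out : String) : Decidable (Spec_map_to_broad_genre candidates out) := by unfold Spec_map_to_broad_genre; infer_instance

-- ===== CLAIM (what is proved, stated in full; the proofs are below) =====
def Claim_equal_map_to_broad_genre : Prop := ∀ (candidates : List String), Dom_map_to_broad_genre candidates → Spec_map_to_broad_genre candidates (map_to_broad_genre candidates)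

-- ===== LEMMAS AND PROOFS =====

-- B's one pass computes, for each category, 'initial flag OR the corresponding any over keys'.
theorem foldl_pvStep (cs : List String) (st : pvFlags) :
    cs.foldl pvStep st =
      (let keys := (cs.filter (fun c => c ≠ "")).map PySem.Str.lower
       (st.1 || keys.any (fun k => PySem.Set.contains pvHipSet k),
        st.2.1 || keys.any (fun k => PySem.Str.isIn "metal" k),
        st.2.2.1 || keys.any (fun k => PySem.Set.contains pvRockSet k),
        st.2.2.2.1 || keys.any (fun k => PySem.Set.contains pvElecSet k),
        st.2.2.2.2.1 || keys.any (fun k => k == "dance"),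
        st.2.2.2.2.2.1 || keys.any (fun k => PySem.Str.isIn "pop" k),
        st.2.2.2.2.2.2.1 || keys.any (fun k => PySem.Str.isIn "country" k),
        st.2.2.2.2.2.2.2 || keys.any (fun k => PySem.Str.isIn "alternative" k))) := by
  induction cs generalizing st with
  | nil => simp
  | cons c cs ih =>
    by_cases h : c = ""
    · simp [pvStep, h, ih]
    · simp only [List.foldl_cons, ih, pvStep, h, List.filter_cons, decide_not]
      simp [Bool.or_assoc]

-- membership symmetry: 'any constant is in keys' = 'some key is in the constant set'
theorem any_contains_comm (L keys : List String) :
    L.any (fun k => keys.contains k) = keys.any (fun k => PySem.Set.contains L k) := by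
  rw [Bool.eq_iff_iff]
  simp only [List.any_eq_true, PySem.Set.contains_eq_listContains, List.contains_iff_mem]
  exact ⟨fun ⟨x, h1, h2⟩ => ⟨x, h2, h1⟩, fun ⟨x, h1, h2⟩ => ⟨x, h2, h1⟩⟩

theorem contains_dance_eq_any (keys : List String) :
    keys.contains "dance" = keys.any (fun k => k == "dance") := by
  rw [Bool.eq_iff_iff]
  simp only [List.any_eq_true, List.contains_iff_mem, beq_iff_eq]
  exact ⟨fun h => ⟨_, h, rfl⟩, fun ⟨x, h1, h2⟩ => h2 ▸ h1⟩

-- ===== VERDICT (by name: the statement is the Claim_ definition above) =====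
theorem map_to_broad_genre_spec : Claim_equal_map_to_broad_genre := by
  intro candidates _
  unfold Spec_map_to_broad_genre map_to_broad_genre map_to_broad_genre_alt
  rw [foldl_pvStep]
  have hfb : pvFirstOrEmpty pvBroadGenres = "Hip Hop/R&B" := by decide
  simp only [Bool.false_or, any_contains_comm, contains_dance_eq_any, hfb,
    pvHipSet, pvRockSet, pvElecSet]
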